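-- pv_equiv track=rewrite | github.com/Jrana1/leedCode_problem_solutions | some_with_exactly_k_elements.py | maximizeSum
-- ===== SOURCE A (Python) =====
-- def maximizeSum(nums, k) -> int:
--             import queue
--             pq=queue.PriorityQueue()
--             for x in nums:
--               pq.put(-x)
--             ans=0
--             while k:
--                 k-=1
--                 item=pq.get()
--                 pq.put(-((-1)*item+1))
--                 ans+=(-1)*item
--             return ans
-- ===== SOURCE B (Python) =====
-- def maximizeSum(nums, k) -> int:
--     if k == 0:
--         return 0
--     m = max(nums)
--     return k * m + k * (k - 1) // 2
-- ===== Notes on version B (the rewrite author's own statement) =====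
-- stated objective: faster
-- what changed: Replaces the priority-queue simulation (k pop/push rounds) with one max scan and the closed-form arithmetic series k*max + k*(k-1)//2.
import Mathlib
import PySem

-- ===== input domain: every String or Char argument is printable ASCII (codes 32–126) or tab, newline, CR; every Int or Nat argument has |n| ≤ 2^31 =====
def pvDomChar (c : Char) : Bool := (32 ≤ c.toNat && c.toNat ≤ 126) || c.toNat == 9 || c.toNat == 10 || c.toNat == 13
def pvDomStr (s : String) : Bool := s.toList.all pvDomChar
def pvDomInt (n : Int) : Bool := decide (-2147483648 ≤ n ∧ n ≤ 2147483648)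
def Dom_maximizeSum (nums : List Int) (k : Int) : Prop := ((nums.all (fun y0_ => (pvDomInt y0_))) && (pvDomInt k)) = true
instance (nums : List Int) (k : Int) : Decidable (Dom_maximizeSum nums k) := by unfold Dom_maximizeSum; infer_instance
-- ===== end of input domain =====

-- B replaces A's priority-queue simulation (k rounds of pop-max/push-max+1) with one
-- max scan and the closed-form series k*max + k*(k-1)//2 (objective: faster, asymptotic).


-- ===== PORT A =====
-- pq.get(): remove and return the minimum element (PriorityQueue); none on empty queue
def pvPqGet (pq : List Int) : Option (Int × List Int) :=
  match PySem.List.min? pq (fun x => x) with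
  | none => none
  | some m =>
    match PySem.List.remove? pq m with
    | none => none
    | some rest => some (m, rest)

-- the 'while k:' loop of A, one iteration per unit of k (fuel = k, valid for k ≥ 0)
def maximizeSumLoop : Nat → List Int → Int → Int
  | 0, _, ans => ans
  | n + 1, pq, ans =>
    match pvPqGet pq with
    | none => ans   -- pq.get() on an empty queue blocks in Python; excluded by Pre_
    | some (item, rest) =>
      maximizeSumLoop n ((-((-1) * item + 1)) :: rest) (ans + (-1) * item)

def maximizeSum (nums : List Int) (k : Int) : Int :=
  let pq := nums.foldl (fun pq x => (-x) :: pq) []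
  maximizeSumLoop k.toNat pq 0

-- ===== PORT B =====
def maximizeSum_alt (nums : List Int) (k : Int) : Int :=
  if k = 0 then 0
  else
    match PySem.List.max? nums (fun x => x) with
    | none => 0   -- max([]) raises ValueError; excluded by Pre_
    | some m => k * m + PySem.Int.floordiv (k * (k - 1)) 2

-- ===== PRECONDITION & SPEC =====
-- A loops forever when k < 0 ('while k' never ends) and blocks on pq.get() when k > 0 and
-- nums is empty; exactly those inputs are excluded.
def Pre_maximizeSum (nums : List Int) (k : Int) : Prop := 0 ≤ k ∧ (k = 0 ∨ nums ≠ [])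
instance (nums : List Int) (k : Int) : Decidable (Pre_maximizeSum nums k) := by unfold Pre_maximizeSum; infer_instance
def pvWitness_maximizeSum : List Int × Int := ([1, 2, 3], 4)

def Spec_maximizeSum (nums : List Int) (k : Int) (out : Int) : Prop := out = maximizeSum_alt nums k
instance (nums : List Int) (k : Int) (out : Int) : Decidable (Spec_maximizeSum nums k out) := by unfold Spec_maximizeSum; infer_instance

-- ===== CLAIM (what is proved, stated in full; the proofs are below) =====
def Claim_equal_maximizeSum : Prop := ∀ (nums : List Int) (k : Int), Dom_maximizeSum nums k → Pre_maximizeSum nums k → Spec_maximizeSum nums k (maximizeSum nums k)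

-- ===== LEMMAS AND PROOFS =====

-- loop invariant: if m is the minimum of pq, running the loop n more times adds
-- n*(-m) + n*(n-1)/2 to ans (the popped values are -m, -m+1, …)
theorem maximizeSumLoop_eq (n : Nat) : ∀ (pq : List Int) (ans m : Int),
    PySem.List.min? pq (fun x => x) = some m →
    maximizeSumLoop n pq ans = ans + n * (-m) + (n * (n - 1) : Nat) / 2 := by
  induction n with
  | zero => intro pq ans m _; simp [maximizeSumLoop]
  | succ n ih =>
    intro pq ans m hmin
    have hmem : m ∈ pq := PySem.List.min?_mem hmin
    have hrem : PySem.List.remove? pq m = some (pq.erase m) :=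
      PySem.List.remove?_eq_some_erase pq m hmem
    have hbody : maximizeSumLoop (n + 1) pq ans =
        maximizeSumLoop n ((-((-1) * m + 1)) :: pq.erase m) (ans + (-1) * m) := by
      simp [maximizeSumLoop, pvPqGet, hmin, hrem]
    -- the new pushed element m - 1 is the new minimum
    have hmin' : PySem.List.min? ((-((-1) * m + 1)) :: pq.erase m) (fun x => x) = some (m - 1) := by
      have hle : ∀ y ∈ pq, m ≤ y := PySem.List.min?_isMin hmin
      have : -((-1) * m + 1) = m - 1 := by ring
      rw [this, PySem.List.min?_id_cons]
      congr 1
      have hfold : ∀ (l : List Int) (a : Int), (∀ y ∈ l, a ≤ y) → l.foldl min a = a := by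
        intro l
        induction l with
        | nil => intro a _; simp
        | cons x t iht =>
          intro a h
          simp only [List.foldl_cons]
          have hax : a ≤ x := h x (by simp)
          rw [min_eq_left hax]
          exact iht a (fun y hy => h y (List.mem_cons_of_mem _ hy))
      exact hfold _ _ (fun y hy => by
        have : y ∈ pq := List.mem_of_mem_erase hy
        have := hle y this
        omega)
    rw [hbody, ih _ _ _ hmin']
    have hN : ((n + 1) * (n + 1 - 1)) / 2 = (n * (n - 1)) / 2 + n := by
      cases n with
      | zero => rfl
      | succ p =>
        have h1 : (p + 1 + 1) * (p + 1 + 1 - 1) = (p + 1) * p + (p + 1) * 2 := by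
          simp only [Nat.add_sub_cancel]
          ring
        rw [h1, Nat.add_mul_div_right _ _ (by norm_num : (0:Nat) < 2)]
        simp only [Nat.add_sub_cancel]
    have hcast : (((n + 1) * (n + 1 - 1) : Nat) : Int) / 2 = ((n * (n - 1) : Nat) : Int) / 2 + (n : Int) := by
      calc (((n + 1) * (n + 1 - 1) : Nat) : Int) / 2
          = ((((n + 1) * (n + 1 - 1)) / 2 : Nat) : Int) := (Int.natCast_div _ _).symm
        _ = (((n * (n - 1)) / 2 + n : Nat) : Int) := by rw [hN]
        _ = ((((n * (n - 1)) / 2 : Nat)) : Int) + (n : Int) := by push_cast; ring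
        _ = ((n * (n - 1) : Nat) : Int) / 2 + (n : Int) := by rw [Int.natCast_div]; norm_num
    rw [hcast]
    push_cast
    ring

theorem foldl_neg_min (nums : List Int) (_hne : nums ≠ []) :
    ∀ m, PySem.List.max? nums (fun x => x) = some m →
    PySem.List.min? (nums.foldl (fun pq x => (-x) :: pq) []) (fun x => x) = some (-m) := by
  -- the built pq is the reversed list of negations
  have hpq : ∀ (l : List Int) (acc : List Int),
      l.foldl (fun pq x => (-x) :: pq) acc = (l.map (fun x => -x)).reverse ++ acc := by
    intro l
    induction l with
    | nil => intro acc; simp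
    | cons x t iht => intro acc; simp [iht]
  intro m hmax
  rw [hpq nums []]
  have hmem : m ∈ nums := PySem.List.max?_mem hmax
  have hle : ∀ y ∈ nums, y ≤ m := by
    intro y hy; exact PySem.List.max?_isMax hmax y hy
  have hmem' : -m ∈ (nums.map (fun x => -x)).reverse ++ [] := by
    simp only [List.append_nil, List.mem_reverse, List.mem_map]
    exact ⟨m, hmem, rfl⟩
  have hne' : (nums.map (fun x => -x)).reverse ++ [] ≠ [] := by
    intro h; rw [h] at hmem'; exact absurd hmem' (List.not_mem_nil)
  -- min? of a nonempty list is some of its least element; characterize by membership + lower bound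
  obtain ⟨v, hv⟩ : ∃ v, PySem.List.min? ((nums.map (fun x => -x)).reverse ++ []) (fun x => x) = some v := by
    cases h : PySem.List.min? ((nums.map (fun x => -x)).reverse ++ []) (fun x => x) with
    | none => exact absurd ((PySem.List.min?_eq_none_iff _ _).mp h) hne'
    | some v => exact ⟨v, rfl⟩
  have hvmem := PySem.List.min?_mem hv
  have hvmin := PySem.List.min?_isMin hv
  have hv1 : v ≤ -m := hvmin _ hmem'
  have hv2 : -m ≤ v := by
    simp only [List.append_nil, List.mem_reverse, List.mem_map] at hvmem
    obtain ⟨w, hw, rfl⟩ := hvmem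
    have := hle w hw
    omega
  rw [hv]
  congr 1
  omega

-- ===== VERDICT (by name: the statement is the Claim_ definition above) =====
theorem maximizeSum_spec : Claim_equal_maximizeSum := by
  intro nums k _ hpre
  obtain ⟨hk0, hcase⟩ := hpre
  unfold Spec_maximizeSum
  by_cases hk : k = 0
  · subst hk; simp [maximizeSum, maximizeSumLoop, maximizeSum_alt]
  · have hne : nums ≠ [] := hcase.resolve_left hk
    obtain ⟨m, hmax⟩ : ∃ m, PySem.List.max? nums (fun x => x) = some m := by
      cases h : PySem.List.max? nums (fun x => x) with
      | none => exact absurd ((PySem.List.max?_eq_none_iff _ _).mp h) hne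
      | some m => exact ⟨m, rfl⟩
    have hmin := foldl_neg_min nums hne m hmax
    unfold maximizeSum maximizeSum_alt
    rw [if_neg hk, hmax]
    show maximizeSumLoop k.toNat _ 0 = k * m + PySem.Int.floordiv (k * (k - 1)) 2
    rw [maximizeSumLoop_eq k.toNat _ 0 (-m) hmin]
    have hkt : (k.toNat : Int) = k := Int.toNat_of_nonneg hk0
    have hfd : PySem.Int.floordiv (k * (k - 1)) 2 = (k * (k - 1)) / 2 :=
      PySem.Int.floordiv_eq_ediv_of_pos (by omega)
    rw [hfd]
    have hnat : ((k.toNat * (k.toNat - 1) : Nat) : Int) = k * (k - 1) := by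
      have hk1 : 1 ≤ k := by omega
      push_cast [Nat.cast_sub (by omega : 1 ≤ k.toNat)]
      rw [hkt]
    rw [hnat, hkt]
    ring
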